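-- pv_equiv track=rewrite | github.com/paulinapp1/pp1-rozwiazania | test3_pp1/zad44.04.py | f
-- ===== SOURCE A (Python) =====
-- def f(password):
--     unique=[]
--     if len(password)<6:
--         return False
--     for letter in password:
--         if password.count(letter)==1:
--             unique.append(letter)
--     if len(unique)>=6:
--         return True
--     else:
--         return False
-- ===== SOURCE B (Python) =====
-- def f(password):
--     if len(password) < 6:
--         return False
--     s = sorted(password)
--     n = len(s)
--     singles = 0
--     i = 0
--     while i < n:
--         j = i + 1
--         while j < n and s[j] == s[i]:
--             j += 1
--         if j - i == 1:
--             singles += 1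
--         i = j
--     return singles >= 6
-- ===== Notes on version B (the rewrite author's own statement) =====
-- stated objective: faster
-- what changed: Replaces the per-character password.count scan (quadratic) by sorting the characters once and counting singleton runs in one linear pass over the sorted list.
import Mathlib
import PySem

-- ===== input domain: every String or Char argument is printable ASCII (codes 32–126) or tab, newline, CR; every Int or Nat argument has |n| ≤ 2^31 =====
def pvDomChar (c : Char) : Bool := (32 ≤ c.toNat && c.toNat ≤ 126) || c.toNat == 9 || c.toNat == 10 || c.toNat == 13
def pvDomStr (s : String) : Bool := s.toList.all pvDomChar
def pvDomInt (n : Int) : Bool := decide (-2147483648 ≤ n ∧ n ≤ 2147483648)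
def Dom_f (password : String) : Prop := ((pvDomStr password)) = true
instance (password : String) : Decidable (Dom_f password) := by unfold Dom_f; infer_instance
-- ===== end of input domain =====

-- B sorts the characters once and counts singleton runs in one pass instead of
-- calling password.count for every character (faster: quadratic -> sort + linear scan).

-- ===== PORT A =====
def f (password : String) : Bool :=
  let p := password.toList
  if p.length < 6 then false
  else
    let unique := p.foldl (fun acc letter => if p.count letter == 1 then acc ++ [letter] else acc) ([] : List Char)
    if 6 ≤ unique.length then true else false

-- ===== PORT B =====
-- run-length scan over the sorted characters: counts runs of length exactly 1
def countSingles : List Char → Nat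
  | [] => 0
  | x :: xs =>
    (if (xs.takeWhile (fun y => y == x)).length == 0 then 1 else 0) +
      countSingles (xs.dropWhile (fun y => y == x))
  termination_by l => l.length
  decreasing_by
    simp only [List.length_cons]
    exact Nat.lt_succ_of_le (List.length_dropWhile_le _ _)

def f_alt (password : String) : Bool :=
  let p := password.toList
  if p.length < 6 then false
  else decide (6 ≤ countSingles (PySem.List.sorted p (fun x => x) false))

-- ===== PRECONDITION & SPEC =====
def Spec_f (password : String) (out : Bool) : Prop := out = f_alt password
instance (password : String) (out : Bool) : Decidable (Spec_f password out) := by unfold Spec_f; infer_instance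

-- ===== CLAIM (what is proved, stated in full; the proofs are below) =====
def Claim_equal_f : Prop := ∀ (password : String), Dom_f password → Spec_f password (f password)

-- ===== LEMMAS AND PROOFS =====

-- in a ≤-sorted list x :: xs, everything after the leading run of x's is > x
lemma dropWhile_lt_of_sorted (x : Char) : ∀ (xs : List Char),
    (x :: xs).Pairwise (· ≤ ·) → ∀ y ∈ xs.dropWhile (fun y => y == x), x < y := by
  intro xs
  induction xs with
  | nil => intro _ y hy; simp [List.dropWhile] at hy
  | cons a t ih =>
    intro h y hy
    rw [List.dropWhile_cons] at hy
    by_cases hax : (a == x) = true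
    · simp only [hax, if_true] at hy
      have hpw : (x :: t).Pairwise (· ≤ ·) := by
        rcases List.pairwise_cons.mp h with ⟨h1, h2⟩
        exact List.pairwise_cons.mpr
          ⟨fun z hz => h1 z (List.mem_cons_of_mem _ hz), (List.pairwise_cons.mp h2).2⟩
      exact ih hpw y hy
    · simp only [hax] at hy
      have hxa : x ≤ a := (List.pairwise_cons.mp h).1 a (by simp)
      have hax' : a ≠ x := by simpa using hax
      have hxa' : x < a := lt_of_le_of_ne hxa (Ne.symm hax')
      rcases List.mem_cons.mp hy with rfl | hy'
      · exact hxa'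
      · have hay : a ≤ y :=
          (List.pairwise_cons.mp (List.pairwise_cons.mp h).2).1 y hy'
        exact lt_of_lt_of_le hxa' hay

-- on a ≤-sorted list, the run-length singleton count equals countP (count = 1)
lemma countSingles_sorted (l : List Char) (h : l.Pairwise (· ≤ ·)) :
    countSingles l = l.countP (fun c => l.count c == 1) := by
  induction l using countSingles.induct with
  | case1 => simp [countSingles]
  | case2 x xs ih =>
    set run := xs.takeWhile (fun y => y == x) with hrun
    set rest := xs.dropWhile (fun y => y == x) with hrest
    have hsplit : xs = run ++ rest := (List.takeWhile_append_dropWhile).symm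
    have hrunx : ∀ y ∈ run, y = x := by
      intro y hy
      have := List.mem_takeWhile_imp (hrun ▸ hy)
      simpa using this
    have hrestx : ∀ y ∈ rest, y ≠ x := by
      intro y hy
      exact (dropWhile_lt_of_sorted x xs h y (hrest ▸ hy)).ne'
    have hrestpw : rest.Pairwise (· ≤ ·) := by
      have hsub : rest.Sublist xs := hrest ▸ List.dropWhile_sublist _
      exact (List.pairwise_cons.mp h).2.sublist hsub
    have ihr := ih hrestpw
    have hcount_x : (x :: xs).count x = 1 + run.length := by
      rw [hsplit]
      have h1 : run.count x = run.length :=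
        List.count_eq_length.mpr (fun y hy => by simp [hrunx y hy])
      have h2 : rest.count x = 0 :=
        List.count_eq_zero.mpr (fun hx => hrestx x hx rfl)
      simp [List.count_append, h1, h2]
      omega
    set P := fun c => List.count c (x :: xs) == 1 with hPdef
    have hcount_rest : ∀ y ∈ rest, (x :: xs).count y = rest.count y := by
      intro y hy
      have hyx : y ≠ x := hrestx y hy
      have h1 : run.count y = 0 :=
        List.count_eq_zero.mpr (fun hx => hyx (hrunx y hx))
      rw [hsplit]
      simp [List.count_cons, List.count_append, h1]
      exact fun hh => hyx hh.symm
    have hcp_rest : rest.countP P = rest.countP (fun c => rest.count c == 1) := by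
      apply List.countP_congr
      intro y hy
      simp [hPdef, hcount_rest y hy]
    have hcp_run : run.countP P = 0 := by
      apply List.countP_eq_zero.mpr
      intro y hy
      have hyx := hrunx y hy
      subst hyx
      have hlen : 1 ≤ run.length := List.length_pos_of_mem hy
      simp only [hPdef, hcount_x, beq_iff_eq]
      omega
    have e1 : List.countP P (x :: xs)
        = List.countP P run + List.countP P rest + (if P x then 1 else 0) := by
      rw [hsplit, List.countP_cons, List.countP_append]
    rw [countSingles, ← hrun, ← hrest]
    show (if (run.length == 0) = true then 1 else 0) + countSingles rest
        = List.countP P (x :: xs)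
    rw [e1, hcp_run, hcp_rest, ← ihr]
    have hPx : P x = (run.length == 0) := by
      simp only [hPdef, hcount_x]
      rcases run.length with _ | k <;> simp
    rw [hPx]
    rcases run.length with _ | k <;> simp <;> omega

-- the two predicates agree after sorting
lemma countP_sorted_eq (p : List Char) :
    (PySem.List.sorted p (fun x => x) false).countP
        (fun c => (PySem.List.sorted p (fun x => x) false).count c == 1)
      = p.countP (fun c => p.count c == 1) := by
  have hperm : (PySem.List.sorted p (fun x => x) false).Perm p :=
    PySem.List.sorted_perm p (fun x => x) false
  have hpred : (fun c => (PySem.List.sorted p (fun x => x) false).count c == 1)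
      = (fun c => p.count c == 1) := by
    funext c; rw [hperm.count_eq]
  rw [hpred, hperm.countP_eq]

theorem f_spec_aux (password : String) : f password = f_alt password := by
  unfold f f_alt
  set p := password.toList with hp
  by_cases hlen : p.length < 6
  · simp [hlen]
  · simp only [hlen, if_false]
    have hsortpw : (PySem.List.sorted p (fun x => x) false).Pairwise (· ≤ ·) := by
      have := PySem.List.sorted_pairwise (xs := p) (key := fun x => x)
      simpa using this
    rw [PySem.List.foldl_append_if_eq_filter]
    rw [countSingles_sorted _ hsortpw, countP_sorted_eq]
    simp [List.countP_eq_length_filter]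

-- ===== VERDICT (by name: the statement is the Claim_ definition above) =====
theorem f_spec : Claim_equal_f := by
  intro password _
  unfold Spec_f
  exact f_spec_aux password
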